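-- pv_equiv track=rewrite | github.com/danieljhkim/DataStructures-Algorithms | python/algorithms/array/range.py | maxElementsWithinRange
-- ===== SOURCE A (Python) =====
-- def maxElementsWithinRange(nums: list[int], k: int) -> int:
--     """ "
--     - numbers within range of (n - k, n + k)
--     """
--     if len(nums) == 1:
--         return 1
--
--     max_value = max(nums)
--     count = [0] * (max_value + 1)
--
--     for num in nums:  # line sweep
--         count[max(num - k, 0)] += 1
--         if num + k + 1 <= max_value:
--             count[num + k + 1] -= 1
--
--     max_count = 0
--     current_sum = 0
--
--     for val in count:
--         current_sum += val
--         max_count = max(max_count, current_sum)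
--
--     return max_count
-- ===== SOURCE B (Python) =====
-- def maxElementsWithinRange(nums: list[int], k: int) -> int:
--     # max number of elements within one closed window [v - 2k, v] anchored at an element v
--     best = 0
--     for v in nums:
--         c = 0
--         for x in nums:
--             if v - 2 * k <= x <= v:
--                 c += 1
--         best = max(best, c)
--     return best
-- ===== Notes on version B (the rewrite author's own statement) =====
-- stated objective: alternative
-- what changed: Replaced the value-range difference-array line sweep (allocate a counter per value 0..max(nums), then prefix-sum max) with direct counting of elements inside the width-2k window anchored at each element, working only on the list itself.
-- outside the precondition, e.g. on maxElementsWithinRange([3], -1): A returns 1, B returns 0; on maxElementsWithinRange([-2, 3, 1, 1], 0): A returns 3, B returns 2; on maxElementsWithinRange([-2, 0, 5], 1): A returns 1, B returns 2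
import Mathlib
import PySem

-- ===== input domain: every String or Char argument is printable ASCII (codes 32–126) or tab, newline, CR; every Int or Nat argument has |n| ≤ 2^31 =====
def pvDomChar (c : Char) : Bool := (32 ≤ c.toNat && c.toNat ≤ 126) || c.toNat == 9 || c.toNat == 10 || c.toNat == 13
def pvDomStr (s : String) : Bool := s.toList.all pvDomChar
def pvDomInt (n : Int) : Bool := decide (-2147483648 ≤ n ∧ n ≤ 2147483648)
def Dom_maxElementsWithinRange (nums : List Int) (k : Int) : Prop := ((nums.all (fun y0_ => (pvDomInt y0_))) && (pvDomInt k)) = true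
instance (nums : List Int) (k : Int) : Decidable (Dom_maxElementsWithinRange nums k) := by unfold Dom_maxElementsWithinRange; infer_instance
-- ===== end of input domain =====

-- B replaces A's value-range difference-array line sweep with direct counting of elements in the
-- width-2k window anchored at each element (alternative algorithm, independent of the value range).

-- ===== PORT A =====
-- helper for Python's `count[i] += v`: negative index wraps; an out-of-range index raises in
-- Python (IndexError) — excluded by Pre_; the port leaves the list unchanged there.
def listAddAt (xs : List Int) (i v : Int) : List Int :=
  let j := if i < 0 then i + xs.length else i
  if 0 ≤ j ∧ j < xs.length then xs.modify j.toNat (· + v) else xs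

def maxElementsWithinRange (nums : List Int) (k : Int) : Int :=
  if nums.length = 1 then 1
  else
    match PySem.List.max? nums (fun x => x) with
    | none => 0   -- Python: max([]) raises ValueError; excluded by Pre_
    | some maxValue =>
      let count : List Int := List.replicate (maxValue + 1).toNat 0
      let count := nums.foldl (fun cnt num =>
        let cnt := listAddAt cnt (max (num - k) 0) 1
        if num + k + 1 ≤ maxValue then listAddAt cnt (num + k + 1) (-1) else cnt) count
      (count.foldl (fun (acc : Int × Int) val =>
        (max acc.1 (acc.2 + val), acc.2 + val)) (0, 0)).1

-- ===== PORT B =====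
def maxElementsWithinRange_alt (nums : List Int) (k : Int) : Int :=
  nums.foldl (fun best v =>
    max best (nums.foldl (fun c x => if v - 2 * k ≤ x ∧ x ≤ v then c + 1 else c) 0)) 0

-- ===== PRECONDITION & SPEC =====
-- Pre_ excludes: the empty list (max([]) raises ValueError); negative k on lists of length ≥ 2
-- (A's counter index max(nums)-k overflows the table, IndexError); all-negative lists of length ≥ 2
-- (table size max(nums)+1 ≤ 0, IndexError); and lists of length ≥ 2 with an element below -k, where
-- A's sweep over the points 0..max(nums) never counts that element's window (or, via Python's
-- negative-index wraparound on `count[num+k+1] -= 1`, silently returns an accidental value).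
def Pre_maxElementsWithinRange (nums : List Int) (k : Int) : Prop :=
  nums ≠ [] ∧ 0 ≤ k ∧
    (nums.length = 1 ∨ ((∀ x ∈ nums, -k ≤ x) ∧ ∃ y ∈ nums, 0 ≤ y))
instance (nums : List Int) (k : Int) : Decidable (Pre_maxElementsWithinRange nums k) := by
  unfold Pre_maxElementsWithinRange; infer_instance

def pvWitness_maxElementsWithinRange : List Int × Int := ([0, 3, 1, 3], 1)

def Spec_maxElementsWithinRange (nums : List Int) (k : Int) (out : Int) : Prop := out = maxElementsWithinRange_alt nums k
instance (nums : List Int) (k : Int) (out : Int) : Decidable (Spec_maxElementsWithinRange nums k out) := by unfold Spec_maxElementsWithinRange; infer_instance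

-- ===== CLAIM (what is proved, stated in full; the proofs are below) =====
def Claim_equal_maxElementsWithinRange : Prop := ∀ (nums : List Int) (k : Int), Dom_maxElementsWithinRange nums k → Pre_maxElementsWithinRange nums k → Spec_maxElementsWithinRange nums k (maxElementsWithinRange nums k)

-- ===== LEMMAS AND PROOFS =====

-- the common count both algorithms maximize: how many elements of nums lie in [a, b]
def cntIn (nums : List Int) (a b : Int) : Int :=
  (nums.countP (fun x => decide (a ≤ x ∧ x ≤ b)) : Int)

lemma foldlMax_le {α : Type} (f : α → Int) (c : Int) :
    ∀ (l : List α) (i : Int), i ≤ c → (∀ x ∈ l, f x ≤ c) →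
      l.foldl (fun a x => max a (f x)) i ≤ c := by
  intro l
  induction l with
  | nil => intro i hi _; simpa using hi
  | cons a t ih =>
      intro i hi h
      simp only [List.foldl_cons]
      exact ih _ (max_le hi (h a (by simp))) (fun x hx => h x (List.mem_cons_of_mem _ hx))

lemma take_sum_modify (v : Int) :
    ∀ (xs : List Int) (j m : ℕ), j < xs.length →
      ((xs.modify j (· + v)).take m).sum = (xs.take m).sum + if j < m then v else 0 := by
  intro xs
  induction xs with
  | nil => intro j m h; simp at h
  | cons a t ih =>
      intro j m h
      cases j with
      | zero =>
          cases m with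
          | zero => simp
          | succ m =>
              have hmod : (a :: t).modify 0 (· + v) = (a + v) :: t := by simp
              rw [hmod]
              simp only [List.take_succ_cons, List.sum_cons]
              rw [if_pos (Nat.succ_pos m)]
              ring
      | succ j =>
          cases m with
          | zero => simp
          | succ m =>
              have hmod : (a :: t).modify (j + 1) (· + v) = a :: t.modify j (· + v) := by simp
              rw [hmod]
              simp only [List.take_succ_cons, List.sum_cons]
              rw [ih j m (by simpa using h)]
              split_ifs with h1 h2 h2 <;> omega

lemma length_listAddAt (xs : List Int) (i v : Int) :
    (listAddAt xs i v).length = xs.length := by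
  unfold listAddAt
  dsimp only
  split_ifs <;> first
    | rfl
    | exact List.length_modify _ _ _

lemma take_sum_listAddAt (xs : List Int) (i v : Int) (m : ℕ)
    (h0 : 0 ≤ i) (h1 : i < xs.length) :
    ((listAddAt xs i v).take m).sum = (xs.take m).sum + if i < (m : Int) then v else 0 := by
  unfold listAddAt
  have hne : ¬ i < 0 := by omega
  simp only [hne, if_false]
  rw [if_pos ⟨h0, h1⟩]
  rw [take_sum_modify v xs i.toNat m (by omega)]
  congr 1
  split_ifs with ha hb hb <;> omega

-- the diff-array fold of A: prefix sums are exactly window counts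
lemma sweep_prefix (k M : Int) (hk : 0 ≤ k) (hM : 0 ≤ M) (p : ℕ) (hpM : (p : Int) ≤ M) :
    ∀ (nums : List Int) (cnt : List Int), cnt.length = (M + 1).toNat →
      (∀ x ∈ nums, -k ≤ x ∧ x ≤ M) →
      ((nums.foldl (fun cnt num =>
          let cnt := listAddAt cnt (max (num - k) 0) 1
          if num + k + 1 ≤ M then listAddAt cnt (num + k + 1) (-1) else cnt) cnt).take (p + 1)).sum
        = (cnt.take (p + 1)).sum
          + (nums.countP (fun x => decide ((p : Int) - k ≤ x ∧ x ≤ (p : Int) + k)) : Int) := by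
  intro nums
  induction nums with
  | nil => intro cnt _ _; simp
  | cons num t ih =>
      intro cnt hlen hx
      obtain ⟨hx0, hxM⟩ := hx num (by simp)
      have hrest : ∀ x ∈ t, -k ≤ x ∧ x ≤ M := fun x hx' => hx x (List.mem_cons_of_mem _ hx')
      simp only [List.foldl_cons]
      set cnt1 := listAddAt cnt (max (num - k) 0) 1 with hcnt1
      have hlen1 : cnt1.length = (M + 1).toNat := by rw [hcnt1, length_listAddAt, hlen]
      have hsum1 : (cnt1.take (p + 1)).sum
          = (cnt.take (p + 1)).sum + if max (num - k) 0 < ((p + 1 : ℕ) : Int) then 1 else 0 := by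
        rw [hcnt1]
        exact take_sum_listAddAt cnt _ 1 (p + 1) (by omega) (by omega)
      by_cases hguard : num + k + 1 ≤ M
      · rw [if_pos hguard]
        set cnt2 := listAddAt cnt1 (num + k + 1) (-1) with hcnt2
        have hlen2 : cnt2.length = (M + 1).toNat := by rw [hcnt2, length_listAddAt, hlen1]
        have hsum2 : (cnt2.take (p + 1)).sum
            = (cnt1.take (p + 1)).sum + if num + k + 1 < ((p + 1 : ℕ) : Int) then -1 else 0 := by
          rw [hcnt2]
          exact take_sum_listAddAt cnt1 _ (-1) (p + 1) (by omega) (by omega)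
        rw [ih cnt2 hlen2 hrest, hsum2, hsum1, List.countP_cons]
        simp only [decide_eq_true_eq]
        push_cast
        split_ifs <;> omega
      · rw [if_neg hguard]
        rw [ih cnt1 hlen1 hrest, hsum1, List.countP_cons]
        simp only [decide_eq_true_eq]
        push_cast
        split_ifs <;> omega

-- the running-(max, sum) fold of A is a running max of prefix sums
lemma foldl_maxsum :
    ∀ (L : List Int) (mc cs : Int),
      (L.foldl (fun (acc : Int × Int) val => (max acc.1 (acc.2 + val), acc.2 + val)) (mc, cs)).1
        = (List.range L.length).foldl (fun a i => max a (cs + (L.take (i + 1)).sum)) mc := by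
  intro L
  induction L with
  | nil => intro mc cs; simp
  | cons a t ih =>
      intro mc cs
      simp only [List.foldl_cons, List.length_cons, List.range_succ_eq_map,
        List.foldl_map, List.take_succ_cons, List.sum_cons, List.take_zero,
        List.sum_nil]
      rw [ih]
      have hfun : (fun (b : Int) (i : ℕ) => max b (cs + a + (t.take (i + 1)).sum))
          = (fun (b : Int) (i : ℕ) => max b (cs + (a + (t.take (i + 1)).sum))) := by
        funext b i; ring_nf
      simp only [Nat.succ_eq_add_one, add_zero]
      rw [hfun]

-- a nonempty list of ints has a maximum element
lemma exists_max_mem (l : List Int) (h : l ≠ []) :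
    ∃ v ∈ l, ∀ x ∈ l, x ≤ v := by
  obtain ⟨v, hv⟩ := Option.ne_none_iff_exists'.mp
    (fun hn => h ((PySem.List.max?_eq_none_iff l (fun x : Int => x)).mp hn))
  exact ⟨v, PySem.List.max?_mem hv, fun x hx => PySem.List.max?_isMax hv x hx⟩

-- the combinatorial core: max over sweep positions 0..M of the count in [p-k, p+k]
-- equals max over elements v of the count in [v-2k, v]
lemma core_eq (nums : List Int) (k M : Int) (hk : 0 ≤ k)
    (hlo : ∀ x ∈ nums, -k ≤ x) (hM0 : 0 ≤ M)
    (hmax : ∀ x ∈ nums, x ≤ M) :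
    (List.range ((M + 1).toNat)).foldl
        (fun (a : Int) (p : ℕ) => max a (cntIn nums ((p : Int) - k) ((p : Int) + k))) 0
      = nums.foldl (fun a v => max a (cntIn nums (v - 2 * k) v)) 0 := by
  apply le_antisymm
  · -- each sweep-position count is bounded by some element-anchored count
    apply foldlMax_le _ _ _ _
      ((PySem.List.le_foldl_max_int nums (fun v => cntIn nums (v - 2 * k) v) 0).1)
    intro p _
    by_cases hzero : nums.countP (fun x => decide ((p : Int) - k ≤ x ∧ x ≤ (p : Int) + k)) = 0
    · have : cntIn nums ((p : Int) - k) ((p : Int) + k) = 0 := by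
        unfold cntIn
        rw [hzero]
        rfl
      rw [this]
      exact (PySem.List.le_foldl_max_int nums (fun v => cntIn nums (v - 2 * k) v) 0).1
    · -- the filtered list is nonempty: take its maximum v
      have hfne : nums.filter (fun x => decide ((p : Int) - k ≤ x ∧ x ≤ (p : Int) + k)) ≠ [] := by
        intro hnil
        apply hzero
        rw [List.countP_eq_length_filter, hnil]
        rfl
      obtain ⟨v, hvmem, hvmax⟩ := exists_max_mem _ hfne
      have hvnums : v ∈ nums := List.mem_of_mem_filter hvmem
      have hvP : (p : Int) - k ≤ v ∧ v ≤ (p : Int) + k := by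
        have := List.of_mem_filter hvmem
        simpa using this
      have hle : cntIn nums ((p : Int) - k) ((p : Int) + k) ≤ cntIn nums (v - 2 * k) v := by
        unfold cntIn
        have := List.countP_mono_left (l := nums)
          (p := fun x => decide ((p : Int) - k ≤ x ∧ x ≤ (p : Int) + k))
          (q := fun x => decide (v - 2 * k ≤ x ∧ x ≤ v)) ?_
        · exact_mod_cast this
        · intro x hx hpx
          have hx' : (p : Int) - k ≤ x ∧ x ≤ (p : Int) + k := by simpa using hpx
          have hxv : x ≤ v := hvmax x (List.mem_filter.mpr ⟨hx, by simpa using hx'⟩)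
          simp only [decide_eq_true_eq]
          omega
      exact le_trans hle
        ((PySem.List.le_foldl_max_int nums (fun v => cntIn nums (v - 2 * k) v) 0).2 v hvnums)
  · -- each element-anchored count is realized at sweep position max(v-k, 0)
    apply foldlMax_le _ _ _ _
      ((PySem.List.le_foldl_max_int (List.range ((M + 1).toNat))
        (fun (p : ℕ) => cntIn nums ((p : Int) - k) ((p : Int) + k)) 0).1)
    intro v hv
    have hv0 : -k ≤ v := hlo v hv
    have hvM : v ≤ M := hmax v hv
    set p0 : ℕ := (max (v - k) 0).toNat with hp0
    have hp0cast : (p0 : Int) = max (v - k) 0 := by omega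
    have hp0mem : p0 ∈ List.range ((M + 1).toNat) := List.mem_range.mpr (by omega)
    have hle : cntIn nums (v - 2 * k) v ≤ cntIn nums ((p0 : Int) - k) ((p0 : Int) + k) := by
      unfold cntIn
      have := List.countP_mono_left (l := nums)
        (p := fun x => decide (v - 2 * k ≤ x ∧ x ≤ v))
        (q := fun x => decide ((p0 : Int) - k ≤ x ∧ x ≤ (p0 : Int) + k)) ?_
      · exact_mod_cast this
      · intro x hx hpx
        have hx0 : -k ≤ x := hlo x hx
        have hx' : v - 2 * k ≤ x ∧ x ≤ v := by simpa using hpx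
        simp only [decide_eq_true_eq]
        omega
    exact le_trans hle
      ((PySem.List.le_foldl_max_int (List.range ((M + 1).toNat))
        (fun (p : ℕ) => cntIn nums ((p : Int) - k) ((p : Int) + k)) 0).2 p0 hp0mem)

-- B computes the running max of element-anchored counts
lemma alt_eq (nums : List Int) (k : Int) :
    maxElementsWithinRange_alt nums k
      = nums.foldl (fun a v => max a (cntIn nums (v - 2 * k) v)) 0 := by
  unfold maxElementsWithinRange_alt
  apply PySem.List.foldl_congr_mem
  intro a v _
  rw [PySem.List.foldl_ite_add_one (p := fun x => v - 2 * k ≤ x ∧ x ≤ v)]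
  simp [cntIn]

-- the diff-array fold preserves the table's length
lemma sweep_length (k M : Int) :
    ∀ (nums : List Int) (cnt : List Int),
      (nums.foldl (fun cnt num =>
          let cnt := listAddAt cnt (max (num - k) 0) 1
          if num + k + 1 ≤ M then listAddAt cnt (num + k + 1) (-1) else cnt) cnt).length
        = cnt.length := by
  intro nums
  induction nums with
  | nil => intro cnt; simp
  | cons num t ih =>
      intro cnt
      simp only [List.foldl_cons]
      rw [ih]
      split_ifs <;> simp [length_listAddAt]

-- A on a list of length ≥ 2 with nonnegative elements computes the sweep maximum
lemma a_eq (nums : List Int) (k M : Int) (hk : 0 ≤ k) (hlen : ¬ nums.length = 1)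
    (hmax : PySem.List.max? nums (fun x => x) = some M)
    (hlo : ∀ x ∈ nums, -k ≤ x) (hM0 : 0 ≤ M) :
    maxElementsWithinRange nums k
      = (List.range ((M + 1).toNat)).foldl
          (fun (a : Int) (p : ℕ) => max a (cntIn nums ((p : Int) - k) ((p : Int) + k))) 0 := by
  have hmem : M ∈ nums := PySem.List.max?_mem hmax
  have hbnd : ∀ x ∈ nums, x ≤ M := fun x hx => PySem.List.max?_isMax hmax x hx
  unfold maxElementsWithinRange
  rw [if_neg hlen, hmax]
  simp only
  rw [foldl_maxsum]
  rw [sweep_length k M nums (List.replicate (M + 1).toNat 0), List.length_replicate]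
  apply PySem.List.foldl_congr_mem
  intro a p hp
  have hplt : p < (M + 1).toNat := List.mem_range.mp hp
  have hpM : (p : Int) ≤ M := by omega
  rw [sweep_prefix k M hk hM0 p hpM nums _ (by simp) (fun x hx => ⟨hlo x hx, hbnd x hx⟩)]
  simp [cntIn, List.take_replicate]

-- B returns 1 on any single-element list when 0 ≤ k
lemma alt_single (x k : Int) (hk : 0 ≤ k) : maxElementsWithinRange_alt [x] k = 1 := by
  unfold maxElementsWithinRange_alt
  simp [hk]

-- ===== VERDICT (by name: the statement is the Claim_ definition above) =====
theorem maxElementsWithinRange_spec : Claim_equal_maxElementsWithinRange := by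
  intro nums k _ hpre
  obtain ⟨hne, hk, hcase⟩ := hpre
  unfold Spec_maxElementsWithinRange
  by_cases hlen : nums.length = 1
  · obtain ⟨x, rfl⟩ := List.length_eq_one_iff.mp hlen
    rw [alt_single x k hk]
    unfold maxElementsWithinRange
    rw [if_pos hlen]
  · obtain ⟨hlo, y, hy, hy0⟩ : (∀ x ∈ nums, -k ≤ x) ∧ ∃ y ∈ nums, 0 ≤ y := by
      rcases hcase with h | h
      · exact absurd h hlen
      · exact h
    obtain ⟨M, hmax⟩ : ∃ M, PySem.List.max? nums (fun x : Int => x) = some M := by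
      cases hM : PySem.List.max? nums (fun x : Int => x) with
      | none => exact absurd ((PySem.List.max?_eq_none_iff nums (fun x : Int => x)).mp hM) hne
      | some M => exact ⟨M, rfl⟩
    have hM0 : 0 ≤ M := le_trans hy0 (PySem.List.max?_isMax hmax y hy)
    rw [a_eq nums k M hk hlen hmax hlo hM0, alt_eq nums k,
      core_eq nums k M hk hlo hM0 (fun x hx => PySem.List.max?_isMax hmax x hx)]
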